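-- pv_equiv track=rewrite | github.com/phac-nml/plasmid_analysis | perform_analysis.py | get_plasmid_counts
-- ===== SOURCE A (Python) =====
-- def get_plasmid_counts(contigs):
--     counts = {}
--     for sample_id in contigs:
--         plasmids = contigs[sample_id]['plasmid']
--         if len(plasmids) == 0:
--             continue
--         clusters = {}
--         for contig_id in plasmids:
--             cluster_id = plasmids[contig_id]['primary_cluster_id']
--             clusters[cluster_id] = ''
--         clusters = list(clusters.keys())
--
--         for cluster_id in clusters:
--             if not cluster_id in counts:
--                 counts[cluster_id] = 0
--             counts[cluster_id]+=1
--
--     return counts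
-- ===== SOURCE B (Python) =====
-- def get_plasmid_counts(contigs):
--     # One flat pass: global dedup set of (sample_id, primary_cluster_id) pairs
--     # (a dict used as an insertion-ordered set), then a separate tally pass.
--     pairs = {}
--     for sample_id in contigs:
--         for contig in contigs[sample_id]['plasmid'].values():
--             pairs[(sample_id, contig['primary_cluster_id'])] = None
--     counts = {}
--     for _sample_id, cluster_id in pairs:
--         counts[cluster_id] = counts.get(cluster_id, 0) + 1
--     return counts
-- ===== Notes on version B (the rewrite author's own statement) =====
-- stated objective: alternative
-- what changed: A's per-sample nesting (reset a per-sample cluster dict, dedup, then increment counts inside the sample loop) is replaced by one flat pass building a single global insertion-ordered set of (sample_id, primary_cluster_id) pairs, followed by a separate tally pass over that pair set.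
import Mathlib
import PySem

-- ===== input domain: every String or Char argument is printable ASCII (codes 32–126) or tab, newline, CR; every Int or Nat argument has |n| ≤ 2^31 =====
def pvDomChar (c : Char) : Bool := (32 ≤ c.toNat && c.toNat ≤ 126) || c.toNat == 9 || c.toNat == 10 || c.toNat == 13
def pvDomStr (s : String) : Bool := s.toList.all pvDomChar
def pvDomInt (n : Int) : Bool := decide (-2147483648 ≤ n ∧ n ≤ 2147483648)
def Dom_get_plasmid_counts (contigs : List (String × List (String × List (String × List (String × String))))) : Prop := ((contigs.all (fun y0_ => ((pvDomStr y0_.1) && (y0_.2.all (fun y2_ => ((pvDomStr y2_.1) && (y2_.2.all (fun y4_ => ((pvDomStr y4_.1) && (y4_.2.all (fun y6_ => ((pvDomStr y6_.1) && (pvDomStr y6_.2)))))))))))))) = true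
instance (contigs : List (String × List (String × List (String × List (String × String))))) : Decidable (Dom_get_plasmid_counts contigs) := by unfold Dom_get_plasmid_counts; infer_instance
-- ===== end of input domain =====

-- B replaces A's per-sample dedup-then-count nesting by one flat global pass collecting
-- distinct (sample_id, primary_cluster_id) pairs plus a separate tally pass (alternative decomposition, same cost).


-- ===== PORT A =====
def get_plasmid_counts (contigs : List (String × List (String × List (String × List (String × String))))) : List (String × Int) :=
  (contigs.foldl
    (fun (counts : PySem.Dict String Int) sp =>
      let plasmids := (PySem.Dict.mk sp.2).getD "plasmid" []
      if plasmids.length = 0 then counts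
      else
        let clustersD : PySem.Dict String String :=
          plasmids.foldl
            (fun cl cp => cl.insert ((PySem.Dict.mk cp.2).getD "primary_cluster_id" "") "")
            PySem.Dict.empty
        let clusters := clustersD.keys
        clusters.foldl
          (fun counts cluster_id =>
            let counts := if ¬ counts.contains cluster_id then counts.insert cluster_id 0 else counts
            counts.insert cluster_id (counts.getD cluster_id 0 + 1))
          counts)
    PySem.Dict.empty).items

-- ===== PORT B =====
def get_plasmid_counts_alt (contigs : List (String × List (String × List (String × List (String × String))))) : List (String × Int) :=
  let pairs : PySem.Dict (String × String) (Option Unit) :=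
    contigs.foldl
      (fun prs sp =>
        ((PySem.Dict.mk sp.2).getD "plasmid" []).foldl
          (fun prs cp =>
            prs.insert (sp.1, (PySem.Dict.mk cp.2).getD "primary_cluster_id" "") none)
          prs)
      PySem.Dict.empty
  (pairs.keys.foldl
    (fun (counts : PySem.Dict String Int) k =>
      counts.insert k.2 (counts.getD k.2 0 + 1))
    PySem.Dict.empty).items

-- ===== PRECONDITION & SPEC =====
-- Pre_ excludes (a) inputs where A raises KeyError ('plasmid' missing in a sample record, or
-- 'primary_cluster_id' missing in a contig record under 'plasmid') and (b) association lists with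
-- duplicate keys at some dict level, which no Python dict can present to A, so the ports'
-- first-match/iterate-all behaviour there is accidental.
def Pre_get_plasmid_counts (contigs : List (String × List (String × List (String × List (String × String))))) : Prop :=
  (contigs.map Prod.fst).Nodup ∧
  ∀ sp ∈ contigs,
    (sp.2.map Prod.fst).Nodup ∧ "plasmid" ∈ sp.2.map Prod.fst ∧
    ∀ pe ∈ sp.2, pe.1 = "plasmid" →
      (pe.2.map Prod.fst).Nodup ∧
      ∀ cp ∈ pe.2, (cp.2.map Prod.fst).Nodup ∧ "primary_cluster_id" ∈ cp.2.map Prod.fst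
instance (contigs : List (String × List (String × List (String × List (String × String))))) : Decidable (Pre_get_plasmid_counts contigs) := by unfold Pre_get_plasmid_counts; infer_instance

def pvWitness_get_plasmid_counts : (List (String × List (String × List (String × List (String × String))))) :=
  [("s1", [("plasmid", [("c1", [("primary_cluster_id", "p1")]), ("c2", [("primary_cluster_id", "p1")])])]),
   ("s2", [("plasmid", [("c1", [("primary_cluster_id", "p1")])])]),
   ("s3", [("plasmid", [])])]

def Spec_get_plasmid_counts (contigs : List (String × List (String × List (String × List (String × String))))) (out : List (String × Int)) : Prop := out = get_plasmid_counts_alt contigs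
instance (contigs : List (String × List (String × List (String × List (String × String))))) (out : List (String × Int)) : Decidable (Spec_get_plasmid_counts contigs out) := by unfold Spec_get_plasmid_counts; infer_instance

-- ===== CLAIM (what is proved, stated in full; the proofs are below) =====
def Claim_equal_get_plasmid_counts : Prop := ∀ (contigs : List (String × List (String × List (String × List (String × String))))), Dom_get_plasmid_counts contigs → Pre_get_plasmid_counts contigs → Spec_get_plasmid_counts contigs (get_plasmid_counts contigs)

-- ===== LEMMAS AND PROOFS =====

-- abbreviations for the pieces both ports share (proof-side only)
def pvPc (cp : String × List (String × String)) : String :=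
  (PySem.Dict.mk cp.2).getD "primary_cluster_id" ""

def pvPlas (sp : String × List (String × List (String × List (String × String)))) :
    List (String × List (String × String)) :=
  (PySem.Dict.mk sp.2).getD "plasmid" []

def pvClusters (sp : String × List (String × List (String × List (String × String)))) : List String :=
  PySem.Set.ofList ((pvPlas sp).map pvPc)

def pvTally (counts : PySem.Dict String Int) (L : List String) : PySem.Dict String Int :=
  L.foldl (fun c cid => c.insert cid (c.getD cid 0 + 1)) counts

theorem pv_stepA (counts : PySem.Dict String Int) (cid : String) :
    (let c := if ¬ counts.contains cid then counts.insert cid 0 else counts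
     c.insert cid (c.getD cid 0 + 1)) = counts.insert cid (counts.getD cid 0 + 1) := by
  by_cases h : counts.contains cid
  · simp [h]
  · simp only [h, if_pos, Bool.not_eq_true]
    rw [PySem.Dict.getD_insert_self, PySem.Dict.insert_insert_self,
      PySem.Dict.getD_of_not_contains _ _ (by simp [h])]

theorem pv_foldA (L : List String) (counts : PySem.Dict String Int) :
    L.foldl
      (fun counts cid =>
        let c := if ¬ counts.contains cid then counts.insert cid 0 else counts
        c.insert cid (c.getD cid 0 + 1)) counts = pvTally counts L := by
  induction L generalizing counts with
  | nil => rfl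
  | cons a L ih =>
      simp only [List.foldl_cons]
      rw [show (let c := if ¬ counts.contains a then counts.insert a 0 else counts
                c.insert a (c.getD a 0 + 1)) = counts.insert a (counts.getD a 0 + 1) from
            pv_stepA counts a, ih]
      rfl

theorem pvTally_append (c : PySem.Dict String Int) (a b : List String) :
    pvTally c (a ++ b) = pvTally (pvTally c a) b := by
  simp [pvTally, List.foldl_append]

theorem pv_A_samples (contigs : List (String × List (String × List (String × List (String × String)))))
    (d : PySem.Dict String Int) :
    contigs.foldl
      (fun (counts : PySem.Dict String Int) sp =>
        let plasmids := (PySem.Dict.mk sp.2).getD "plasmid" []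
        if plasmids.length = 0 then counts
        else
          let clustersD : PySem.Dict String String :=
            plasmids.foldl
              (fun cl cp => cl.insert ((PySem.Dict.mk cp.2).getD "primary_cluster_id" "") "")
              PySem.Dict.empty
          let clusters := clustersD.keys
          clusters.foldl
            (fun counts cluster_id =>
              let counts := if ¬ counts.contains cluster_id then counts.insert cluster_id 0 else counts
              counts.insert cluster_id (counts.getD cluster_id 0 + 1))
            counts) d
      = pvTally d (contigs.flatMap pvClusters) := by
  induction contigs generalizing d with
  | nil => rfl
  | cons sp rest ih =>
      simp only [List.foldl_cons, List.flatMap_cons, pvTally_append]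
      rw [ih]
      congr 1
      by_cases h : ((PySem.Dict.mk sp.2).getD "plasmid"
          ([] : List (String × List (String × String)))).length = 0
      · simp only [if_pos h]
        have hnil : (PySem.Dict.mk sp.2).getD "plasmid"
            ([] : List (String × List (String × String))) = [] := List.length_eq_zero_iff.mp h
        simp [pvClusters, pvPlas, hnil, pvTally]
      · simp only [if_neg h]
        rw [pv_foldA]
        congr 1
        have h1 := PySem.Dict.keys_foldl_insert_key
          (l := (PySem.Dict.mk sp.2).getD "plasmid" ([] : List (String × List (String × String))))
          (key := fun cp => (PySem.Dict.mk cp.2).getD "primary_cluster_id" "")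
          (f := fun _ _ => "") (d := PySem.Dict.empty)
        simp only [] at h1
        rw [h1]
        simp only [PySem.Dict.keys_empty]
        rfl

theorem pv_A_flat (contigs : List (String × List (String × List (String × List (String × String))))) :
    get_plasmid_counts contigs = (pvTally PySem.Dict.empty (contigs.flatMap pvClusters)).items := by
  unfold get_plasmid_counts
  rw [pv_A_samples]

theorem pv_fresh_update (K : List (String × String)) (cs : List String) (sid : String)
    (h : ∀ k ∈ K, k.1 ≠ sid) :
    PySem.Set.update K (cs.map (fun c => (sid, c)))
      = K ++ (PySem.Set.ofList cs).map (fun c => (sid, c)) := by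
  induction cs using List.reverseRecOn with
  | nil => simp [PySem.Set.update_nil]
  | append_singleton cs c ih =>
      rw [List.map_append, List.map_singleton, PySem.Set.update_append,
        PySem.Set.update_cons, PySem.Set.update_nil, ih,
        PySem.Set.ofList_append_singleton, PySem.Set.add_eq_ite, PySem.Set.add_eq_ite]
      have hmem : ((sid, c) ∈ K ++ (PySem.Set.ofList cs).map (fun c => (sid, c)))
          ↔ c ∈ PySem.Set.ofList cs := by
        simp only [List.mem_append, List.mem_map]
        constructor
        · rintro (hk | ⟨x, hx, hxe⟩)
          · exact absurd rfl (h _ hk)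
          · cases hxe; exact hx
        · intro hc; exact Or.inr ⟨c, hc, rfl⟩
      by_cases hc : c ∈ PySem.Set.ofList cs
      · rw [if_pos (hmem.mpr hc), if_pos hc]
      · rw [if_neg (fun hx => hc (hmem.mp hx)), if_neg hc, List.map_append,
          List.map_singleton, List.append_assoc]

theorem pv_pairs_keys
    (contigs : List (String × List (String × List (String × List (String × String)))))
    (prs : PySem.Dict (String × String) (Option Unit))
    (hnd : (contigs.map Prod.fst).Nodup)
    (hfresh : ∀ k ∈ prs.keys, k.1 ∉ contigs.map Prod.fst) :
    (contigs.foldl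
      (fun prs sp =>
        ((PySem.Dict.mk sp.2).getD "plasmid" []).foldl
          (fun prs cp =>
            prs.insert (sp.1, (PySem.Dict.mk cp.2).getD "primary_cluster_id" "") none)
          prs)
      prs).keys
      = prs.keys ++ contigs.flatMap (fun sp => (pvClusters sp).map (fun c => (sp.1, c))) := by
  induction contigs generalizing prs with
  | nil => simp
  | cons sp rest ih =>
      simp only [List.foldl_cons, List.flatMap_cons]
      have hkeys : (((PySem.Dict.mk sp.2).getD "plasmid" []).foldl
          (fun prs cp =>
            prs.insert (sp.1, (PySem.Dict.mk cp.2).getD "primary_cluster_id" "") none)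
          prs).keys = prs.keys ++ (pvClusters sp).map (fun c => (sp.1, c)) := by
        have h1 := PySem.Dict.keys_foldl_insert_key
          (l := (PySem.Dict.mk sp.2).getD "plasmid" ([] : List (String × List (String × String))))
          (key := fun cp => (sp.1, (PySem.Dict.mk cp.2).getD "primary_cluster_id" ""))
          (f := fun _ _ => (none : Option Unit)) (d := prs)
        simp only [] at h1
        rw [h1]
        have : ((PySem.Dict.mk sp.2).getD "plasmid" ([] : List (String × List (String × String)))).map
            (fun cp => (sp.1, (PySem.Dict.mk cp.2).getD "primary_cluster_id" ""))
            = ((pvPlas sp).map pvPc).map (fun c => (sp.1, c)) := by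
          simp [List.map_map, pvPlas, pvPc]
        rw [this, pv_fresh_update _ _ _
          (fun k hk => by
            have := hfresh k hk
            simp only [List.map_cons, List.mem_cons] at this
            exact fun he => this (Or.inl he))]
        rfl
      rw [ih _ (by simpa using hnd.of_cons)
          (fun k hk => by
            rw [hkeys] at hk
            rcases List.mem_append.mp hk with hk | hk
            · have := hfresh k hk
              simp only [List.map_cons, List.mem_cons] at this
              exact fun hmem => this (Or.inr hmem)
            · rcases List.mem_map.mp hk with ⟨c, _, rfl⟩
              simp only [List.map_cons, List.nodup_cons] at hnd
              exact hnd.1),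
        hkeys, List.append_assoc]

theorem pv_B_flat (contigs : List (String × List (String × List (String × List (String × String)))))
    (hnd : (contigs.map Prod.fst).Nodup) :
    get_plasmid_counts_alt contigs
      = (pvTally PySem.Dict.empty (contigs.flatMap pvClusters)).items := by
  simp only [get_plasmid_counts_alt]
  rw [pv_pairs_keys contigs PySem.Dict.empty hnd (by simp [PySem.Dict.keys_empty])]
  simp only [PySem.Dict.keys_empty, List.nil_append]
  have hmap : (contigs.flatMap (fun sp => (pvClusters sp).map (fun c => (sp.1, c)))).map Prod.snd
      = contigs.flatMap pvClusters := by
    rw [List.map_flatMap]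
    simp [List.map_map]
  congr 1
  rw [pvTally, ← hmap, List.foldl_map]

-- ===== VERDICT (by name: the statement is the Claim_ definition above) =====
theorem get_plasmid_counts_spec : Claim_equal_get_plasmid_counts := by
  intro contigs _ hpre
  unfold Spec_get_plasmid_counts
  rw [pv_A_flat, pv_B_flat contigs hpre.1]
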